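-- pv_equiv track=rewrite | github.com/Jinstronda/jinstronda-memory | mem0-server/graph_dedup.py | pick_canonical
-- ===== SOURCE A (Python) =====
-- from typing import List, Dict, Tuple
--
-- def pick_canonical(rel_names: List[str], mentions: List[int]) -> Tuple[str, int]:
--     best_idx = 0
--     best_mentions = mentions[0]
--     for i in range(1, len(rel_names)):
--         if mentions[i] > best_mentions:
--             best_idx = i
--             best_mentions = mentions[i]
--         elif mentions[i] == best_mentions and len(rel_names[i]) < len(rel_names[best_idx]):
--             best_idx = i
--     return rel_names[best_idx], best_idx
-- ===== SOURCE B (Python) =====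
-- def pick_canonical(rel_names, mentions):
--     order = sorted(range(len(rel_names)), key=lambda i: (-mentions[i], len(rel_names[i])))
--     best = order[0]
--     return rel_names[best], best
-- ===== Notes on version B (the rewrite author's own statement) =====
-- stated objective: alternative
-- what changed: Replaces A's single-pass running-best loop with mutable best_idx/best_mentions state by a sort of the index list under the key (-mentions[i], len(rel_names[i])) (stability breaking remaining ties by earliest index) followed by taking the first element of the sorted order.
import Mathlib
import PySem

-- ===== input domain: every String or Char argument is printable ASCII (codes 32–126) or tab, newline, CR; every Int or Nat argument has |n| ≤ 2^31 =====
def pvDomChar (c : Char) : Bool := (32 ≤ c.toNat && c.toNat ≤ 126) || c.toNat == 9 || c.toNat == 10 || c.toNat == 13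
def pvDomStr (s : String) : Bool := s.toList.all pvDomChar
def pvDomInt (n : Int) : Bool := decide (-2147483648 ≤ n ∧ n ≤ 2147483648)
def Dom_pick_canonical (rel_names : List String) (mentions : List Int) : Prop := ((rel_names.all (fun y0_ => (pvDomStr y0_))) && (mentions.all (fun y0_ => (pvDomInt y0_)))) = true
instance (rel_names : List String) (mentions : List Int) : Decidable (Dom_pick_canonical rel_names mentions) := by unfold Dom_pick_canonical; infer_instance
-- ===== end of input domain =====

-- B replaces A's running-best loop by a stable sort of the indices under the key
-- (-mentions[i], len(rel_names[i])) and picks the first index of the sorted order;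
-- same result, different decomposition.  Equivalence of the RETURN value is proved on
-- Pre_ (inputs on which the Python A returns; elsewhere both Pythons raise).

-- ===== PORT A =====
def pick_canonical (rel_names : List String) (mentions : List Int) : String × Int :=
  let st := (PySem.List.pyRange 1 (PySem.List.len rel_names) 1).foldl
    (fun (st : Int × Int) i =>
      if st.2 < PySem.List.pyGetD mentions i 0 then (i, PySem.List.pyGetD mentions i 0)
      else if PySem.List.pyGetD mentions i 0 = st.2 ∧
          PySem.Str.len (PySem.List.pyGetD rel_names i "") < PySem.Str.len (PySem.List.pyGetD rel_names st.1 "") then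
        (i, st.2)
      else st)
    (0, PySem.List.pyGetD mentions 0 0)
  (PySem.List.pyGetD rel_names st.1 "", st.1)

-- ===== PORT B =====
def pick_canonical_alt (rel_names : List String) (mentions : List Int) : String × Int :=
  let order := PySem.List.sorted2 (PySem.List.pyRange 0 (PySem.List.len rel_names) 1)
      (fun i => -(PySem.List.pyGetD mentions i 0))
      (fun i => PySem.Str.len (PySem.List.pyGetD rel_names i ""))
  match PySem.List.pyGet? order 0 with
  | none => ("", 0)          -- Python's order[0] raises IndexError here (excluded by Pre_)
  | some best => (PySem.List.pyGetD rel_names best "", best)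

-- ===== PRECONDITION & SPEC =====
-- Pre_: exactly the inputs on which Python A returns (nonempty rel_names and mentions at
-- least as long; otherwise A raises IndexError).
def Pre_pick_canonical (rel_names : List String) (mentions : List Int) : Prop :=
  rel_names ≠ [] ∧ rel_names.length ≤ mentions.length
instance (rel_names : List String) (mentions : List Int) : Decidable (Pre_pick_canonical rel_names mentions) := by unfold Pre_pick_canonical; infer_instance

def pvWitness_pick_canonical : List String × List Int := (["likes", "knows", "is"], [2, 2, 1])

def Spec_pick_canonical (rel_names : List String) (mentions : List Int) (out : String × Int) : Prop := out = pick_canonical_alt rel_names mentions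
instance (rel_names : List String) (mentions : List Int) (out : String × Int) : Decidable (Spec_pick_canonical rel_names mentions out) := by unfold Spec_pick_canonical; infer_instance

-- ===== CLAIM (what is proved, stated in full; the proofs are below) =====
def Claim_equal_pick_canonical : Prop := ∀ (rel_names : List String) (mentions : List Int), Dom_pick_canonical rel_names mentions → Pre_pick_canonical rel_names mentions → Spec_pick_canonical rel_names mentions (pick_canonical rel_names mentions)

-- ===== LEMMAS AND PROOFS =====

-- insertBy into the empty accumulator.
lemma pv_insertBy_nil {α : Type} (before : α → α → Bool) (x : α) :
    PySem.List.insertBy before x [] = [x] := rfl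

-- Head of an insertion-sort fold: inserting elements of L one by one into an accumulator
-- with head h leaves, as head, the running best of h and L under `before`.
lemma pv_head_foldl_insertBy {α : Type} (before : α → α → Bool) (L : List α) :
    ∀ (h : α) (t : List α), ∃ t',
      L.foldl (fun acc x => PySem.List.insertBy before x acc) (h :: t)
        = (L.foldl (fun b x => if before x b then x else b) h) :: t' := by
  induction L with
  | nil => intro h t; exact ⟨t, rfl⟩
  | cons x L ih =>
    intro h t
    by_cases hb : before x h
    · simpa [List.foldl_cons, PySem.List.insertBy, hb] using ih x (h :: t)
    · obtain ⟨t', ht'⟩ := ih h (PySem.List.insertBy before x t)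
      exact ⟨t', by simpa [List.foldl_cons, PySem.List.insertBy, hb] using ht'⟩

-- A's two-branch update of (best_idx, best_mentions) is the running best under B's sort
-- ordering `before` (keys -mentions and name length), one step.
lemma pv_step (m l : Int → Int) (j i : Int) :
    (if m j < m i then (i, m i)
     else if m i = m j ∧ l i < l j then (i, m j)
     else (j, m j))
    = ((if (decide (-(m i) < -(m j)) || (!decide (-(m j) < -(m i)) && decide (l i < l j))) then i else j),
       m (if (decide (-(m i) < -(m j)) || (!decide (-(m j) < -(m i)) && decide (l i < l j))) then i else j)) := by
  by_cases h1 : m j < m i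
  · have e : -(m i) < -(m j) := by omega
    simp [h1, e]
  · by_cases h2 : m i = m j ∧ l i < l j
    · obtain ⟨h2a, h2b⟩ := h2
      have e1 : ¬ (-(m i) < -(m j)) := by omega
      have e2 : ¬ (-(m j) < -(m i)) := by omega
      simp [h2a, h2b]
    · have e1 : ¬ (-(m i) < -(m j)) := by omega
      by_cases h3 : m i = m j
      · have h4 : ¬ l i < l j := fun hl => h2 ⟨h3, hl⟩
        have e2 : ¬ (-(m j) < -(m i)) := by omega
        simp [h3, h4]
      · have e2 : -(m j) < -(m i) := by omega
        simp [h1, h3, e1, e2]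

-- A's whole fold equals the running best under `before`, paired with its mentions value.
lemma pv_fold (m l : Int → Int) (L : List Int) :
    ∀ (j : Int),
      L.foldl (fun (st : Int × Int) i =>
          if st.2 < m i then (i, m i)
          else if m i = st.2 ∧ l i < l st.1 then (i, st.2)
          else st) (j, m j)
      = (L.foldl (fun b i => if (decide (-(m i) < -(m b)) || (!decide (-(m b) < -(m i)) && decide (l i < l b))) then i else b) j,
         m (L.foldl (fun b i => if (decide (-(m i) < -(m b)) || (!decide (-(m b) < -(m i)) && decide (l i < l b))) then i else b) j)) := by
  induction L with
  | nil => intro j; rfl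
  | cons i L ih =>
    intro j
    rw [List.foldl_cons, List.foldl_cons, pv_step m l j i]
    exact ih _

-- ===== VERDICT (by name: the statement is the Claim_ definition above) =====
theorem pick_canonical_spec : Claim_equal_pick_canonical := by
  intro rel_names mentions _ hpre
  obtain ⟨hne, _⟩ := hpre
  have hn : (0 : Int) < PySem.List.len rel_names := by
    simp [PySem.List.len_eq]
    exact List.length_pos_iff.mpr hne
  set m : Int → Int := fun i => PySem.List.pyGetD mentions i 0 with hm
  set l : Int → Int := fun i => PySem.Str.len (PySem.List.pyGetD rel_names i "") with hl
  set before : Int → Int → Bool := fun i b =>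
    (decide (-(m i) < -(m b)) || (!decide (-(m b) < -(m i)) && decide (l i < l b))) with hbef
  set j' : Int := (PySem.List.pyRange 1 (PySem.List.len rel_names)).foldl
      (fun b i => if before i b then i else b) 0 with hj'
  unfold Spec_pick_canonical
  have hleft : pick_canonical rel_names mentions = (PySem.List.pyGetD rel_names j' "", j') := by
    simp only [pick_canonical]
    rw [pv_fold m l _ 0]
  have hright : pick_canonical_alt rel_names mentions = (PySem.List.pyGetD rel_names j' "", j') := by
    simp only [pick_canonical_alt, PySem.List.sorted2, Bool.false_eq_true, if_false]
    rw [PySem.List.pyRange_one_cons hn, List.foldl_cons, pv_insertBy_nil]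
    obtain ⟨t', ht'⟩ := pv_head_foldl_insertBy before
      (PySem.List.pyRange (0 + 1) (PySem.List.len rel_names)) 0 []
    simp only [hbef, hm, hl] at ht'
    rw [ht']
    simp [PySem.List.pyGet?, PySem.List.pyIdx?, hj', hbef, hm, hl, zero_add]
  rw [hleft, hright]
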